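-- pv_equiv track=rewrite | github.com/Kundan547/CodeVita | problem1.py | find_weird_faculty_index
-- ===== SOURCE A (Python) =====
-- def find_weird_faculty_index(scores):
--     total_sum = sum(scores)
--     left_sum = 0
--
--     for i in range(len(scores)):
--         total_sum -= scores[i]  # total_sum now represents the sum of elements on the right
--         if left_sum > total_sum:
--             return i  # index where left_sum becomes greater than right_sum
--         left_sum += scores[i]
--
--     return -1  # in case no such index is found
-- ===== SOURCE B (Python) =====
-- def find_weird_faculty_index(scores):
--     # Scan right-to-left: maintain the suffix sum and overwrite the candidate
--     # answer, so the final value is the smallest qualifying index.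
--     total = sum(scores)
--     suffix = 0
--     ans = -1
--     for i in range(len(scores) - 1, -1, -1):
--         x = scores[i]
--         if total - x - suffix > suffix:  # left sum > right sum at i
--             ans = i
--         suffix += x
--     return ans
-- ===== Notes on version B (the rewrite author's own statement) =====
-- stated objective: alternative
-- what changed: B traverses the list right-to-left maintaining a suffix sum and a candidate index that it overwrites (last write wins = smallest index), with the comparison rewritten as total - x - suffix > suffix, instead of A's left-to-right scan with two running sums and an early return.
import Mathlib
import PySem

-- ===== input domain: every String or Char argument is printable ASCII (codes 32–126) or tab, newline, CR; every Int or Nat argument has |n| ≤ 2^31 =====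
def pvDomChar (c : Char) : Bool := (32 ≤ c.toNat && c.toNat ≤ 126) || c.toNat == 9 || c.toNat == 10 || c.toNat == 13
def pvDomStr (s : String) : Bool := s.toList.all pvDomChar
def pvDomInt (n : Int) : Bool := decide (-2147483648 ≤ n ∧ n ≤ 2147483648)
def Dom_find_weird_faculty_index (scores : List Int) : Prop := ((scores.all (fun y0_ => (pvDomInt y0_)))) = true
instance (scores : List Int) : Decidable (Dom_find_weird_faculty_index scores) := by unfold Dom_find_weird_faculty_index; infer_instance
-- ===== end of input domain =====

-- B scans right-to-left with a suffix sum and an overwritten candidate index instead of A's left-to-right early-return scan; alternative decomposition, same O(n) cost.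


-- ===== PORT A =====
-- A's loop: total_sum -= scores[i]; if left_sum > total_sum return i; left_sum += scores[i]
def pvGoA : List Int → Int → Int → Nat → Int
  | [], _, _, _ => -1
  | x :: xs, left, total, i =>
      let total' := total - x
      if left > total' then (i : Int) else pvGoA xs (left + x) total' (i + 1)

def find_weird_faculty_index (scores : List Int) : Int :=
  pvGoA scores 0 scores.sum 0

-- ===== PORT B =====
-- Source B's backwards loop, as structural recursion unwinding from the right:
-- the recursive call on the tail runs the loop over the higher indices first
-- (returning that segment's suffix sum and its candidate answer), then the
-- current index is processed: a hit here OVERWRITES the tail's candidate.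
def pvGoB (total : Int) : List Int → Nat → Int × Int
  | [], _ => (0, -1)
  | x :: rest, i =>
      let (s, a) := pvGoB total rest (i + 1)
      (x + s, if total - x - s > s then (i : Int) else a)

def find_weird_faculty_index_alt (scores : List Int) : Int :=
  (pvGoB scores.sum scores 0).2

-- ===== PRECONDITION & SPEC =====
def Spec_find_weird_faculty_index (scores : List Int) (out : Int) : Prop := out = find_weird_faculty_index_alt scores
instance (scores : List Int) (out : Int) : Decidable (Spec_find_weird_faculty_index scores out) := by unfold Spec_find_weird_faculty_index; infer_instance

-- ===== CLAIM (what is proved, stated in full; the proofs are below) =====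
def Claim_equal_find_weird_faculty_index : Prop := ∀ (scores : List Int), Dom_find_weird_faculty_index scores → Spec_find_weird_faculty_index scores (find_weird_faculty_index scores)

-- ===== LEMMAS AND PROOFS =====

theorem pvGoB_fst (total : Int) (xs : List Int) (i : Nat) :
    (pvGoB total xs i).1 = xs.sum := by
  induction xs generalizing i with
  | nil => simp [pvGoB]
  | cons x rest ih => simp [pvGoB, ih]

theorem pvGoA_eq_pvGoB (xs : List Int) (acc : Int) (i : Nat) :
    pvGoA xs acc xs.sum i = (pvGoB (acc + xs.sum) xs i).2 := by
  induction xs generalizing acc i with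
  | nil => simp [pvGoA, pvGoB]
  | cons x rest ih =>
      simp only [pvGoA, pvGoB, List.sum_cons, pvGoB_fst]
      have h1 : acc + (x + rest.sum) - x - rest.sum = acc := by ring
      have h2 : x + rest.sum - x = rest.sum := by ring
      rw [h1, h2]
      split
      · rfl
      · have h3 : acc + (x + rest.sum) = (acc + x) + rest.sum := by ring
        rw [h3] at *
        exact ih (acc + x) (i + 1)

-- ===== VERDICT (by name: the statement is the Claim_ definition above) =====
theorem find_weird_faculty_index_spec : Claim_equal_find_weird_faculty_index := by
  intro scores _
  unfold Spec_find_weird_faculty_index find_weird_faculty_index find_weird_faculty_index_alt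
  have h := pvGoA_eq_pvGoB scores 0 0
  rwa [zero_add] at h
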